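-- pv_equiv track=rewrite | github.com/EricFukuyama/BancoDeDados | Trabalho/Auxiliares.py | detectaJoin
-- ===== SOURCE A (Python) =====
-- def detectaJoin(lista):
--     i = 0
--     string = ''
--     for palavra in lista:
--         string += palavra
--
--     try:
--         i += string.count('.')
--         i += string.count('=')
--     except:
--         i = -1
--
--     if i == 3:
--         return True
--     return False
-- ===== SOURCE B (Python) =====
-- def detectaJoin(lista):
--     total = 0
--     for palavra in lista:
--         total += palavra.count('.') + palavra.count('=')
--     return total == 3
-- ===== Notes on version B (the rewrite author's own statement) =====
-- stated objective: simpler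
-- what changed: B drops the build-the-whole-string concatenation and the dead try/except, keeping a single integer accumulator that adds each word's '.' and '=' counts in one pass.
import Mathlib
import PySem

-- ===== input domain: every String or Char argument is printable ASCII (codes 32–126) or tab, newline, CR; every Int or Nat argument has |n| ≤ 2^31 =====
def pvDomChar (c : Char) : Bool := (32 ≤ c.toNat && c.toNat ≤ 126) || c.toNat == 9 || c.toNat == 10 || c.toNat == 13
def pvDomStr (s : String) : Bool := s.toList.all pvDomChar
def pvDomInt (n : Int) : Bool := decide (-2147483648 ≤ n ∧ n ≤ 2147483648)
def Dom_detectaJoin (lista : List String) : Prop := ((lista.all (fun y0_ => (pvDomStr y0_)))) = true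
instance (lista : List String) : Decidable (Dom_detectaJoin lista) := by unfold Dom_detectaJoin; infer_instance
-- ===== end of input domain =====

-- B replaces A's string concatenation (plus dead try/except) by a single accumulating pass
-- that sums each word's '.' and '=' counts; objective: simpler.


-- ===== PORT A =====
-- A: build one big string by += over the list, then count '.' and count '='
-- (the try/except around the counts can never fire on strings and is not a branch in the port),
-- return (i == 3).
def detectaJoin (lista : List String) : Bool :=
  let string := lista.foldl (fun acc palavra => acc ++ palavra) ""
  let i : Int := 0 + (PySem.Str.count string "." : Int) + (PySem.Str.count string "=" : Int)
  i == 3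

-- ===== PORT B =====
-- B: single pass, accumulate per-word counts.
def detectaJoin_alt (lista : List String) : Bool :=
  (lista.foldl
      (fun total palavra =>
        total + ((PySem.Str.count palavra "." : Int) + (PySem.Str.count palavra "=" : Int)))
      0) == 3

-- ===== PRECONDITION & SPEC =====
def Spec_detectaJoin (lista : List String) (out : Bool) : Prop := out = detectaJoin_alt lista
instance (lista : List String) (out : Bool) : Decidable (Spec_detectaJoin lista out) := by unfold Spec_detectaJoin; infer_instance

-- ===== CLAIM (what is proved, stated in full; the proofs are below) =====
def Claim_equal_detectaJoin : Prop := ∀ (lista : List String), Dom_detectaJoin lista → Spec_detectaJoin lista (detectaJoin lista)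

-- ===== LEMMAS AND PROOFS =====

-- Python's str.count with a single-character needle is the character count.
theorem chars_count_go_single (c : Char) :
    ∀ (s : List Char) (fuel acc : ℕ), s.length ≤ fuel →
      PySem.Chars.count.go [c] fuel s acc = acc + s.count c := by
  intro s
  induction s with
  | nil =>
      intro fuel acc _
      rw [PySem.Chars.count.go.eq_def]
      cases fuel <;> simp
  | cons h t ih =>
      intro fuel acc hle
      cases fuel with
      | zero => simp at hle
      | succ fuel =>
        rw [PySem.Chars.count.go.eq_def]
        simp only [List.isPrefixOf]
        by_cases hc : h = c
        · subst hc
          simp only [beq_self_eq_true, Bool.true_and]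
          rw [if_pos (by simp)]
          simp only [List.length_cons, List.drop_succ_cons, List.length_nil, List.drop_zero]
          rw [ih fuel (acc + 1) (by simpa using Nat.succ_le_succ_iff.mp hle)]
          simp
          omega
        · rw [if_neg (by simp; exact fun hcb => hc hcb.symm)]
          rw [ih fuel acc (by simpa using Nat.succ_le_succ_iff.mp hle)]
          simp [hc]

theorem chars_count_single (s : List Char) (c : Char) :
    PySem.Chars.count s [c] = s.count c := by
  unfold PySem.Chars.count
  simp only [List.isEmpty_cons, Bool.false_eq_true, if_false]
  simpa using chars_count_go_single c s s.length 0 le_rfl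

theorem str_count_single (s : String) (c : Char) :
    PySem.Str.count s (String.ofList [c]) = s.toList.count c := by
  rw [PySem.Str.count_eq]
  simp [chars_count_single]

-- the concatenation loop flattens
theorem foldl_append_toList (lista : List String) :
    ∀ init : String,
      (lista.foldl (fun acc p => acc ++ p) init).toList
        = init.toList ++ (lista.map String.toList).flatten := by
  induction lista with
  | nil => intro init; simp
  | cons h t ih =>
      intro init
      simp only [List.foldl_cons, List.map_cons, List.flatten_cons]
      rw [ih]
      simp

theorem foldl_sum_counts (f : String → Int) (lista : List String) :
    ∀ a : Int, lista.foldl (fun total p => total + f p) a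
        = a + ((lista.map f).sum) := by
  induction lista with
  | nil => intro a; simp
  | cons h t ih => intro a; simp [List.foldl_cons, ih]; ring

-- ===== VERDICT (by name: the statement is the Claim_ definition above) =====
theorem detectaJoin_spec : Claim_equal_detectaJoin := by
  intro lista _
  unfold Spec_detectaJoin detectaJoin detectaJoin_alt
  have hs : (lista.foldl (fun acc p => acc ++ p) "").toList
      = (lista.map String.toList).flatten := by
    simpa using foldl_append_toList lista ""
  have hdot : PySem.Str.count (lista.foldl (fun acc p => acc ++ p) "") "."
      = ((lista.map String.toList).flatten).count '.' := by
    have h := str_count_single (lista.foldl (fun acc p => acc ++ p) "") '.'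
    rw [hs] at h; exact h
  have heqc : PySem.Str.count (lista.foldl (fun acc p => acc ++ p) "") "="
      = ((lista.map String.toList).flatten).count '=' := by
    have h := str_count_single (lista.foldl (fun acc p => acc ++ p) "") '='
    rw [hs] at h; exact h
  rw [foldl_sum_counts (fun p => ((PySem.Str.count p "." : Int) + (PySem.Str.count p "=" : Int))) lista 0]
  simp only [hdot, heqc, List.count_flatten, zero_add]
  have hmapd : (lista.map String.toList).map (fun x => x.count '.')
      = lista.map (fun p => PySem.Str.count p ".") := by
    rw [List.map_map]
    apply List.map_congr_left
    intro p _
    exact (str_count_single p '.').symm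
  have hmape : (lista.map String.toList).map (fun x => x.count '=')
      = lista.map (fun p => PySem.Str.count p "=") := by
    rw [List.map_map]
    apply List.map_congr_left
    intro p _
    exact (str_count_single p '=').symm
  rw [hmapd, hmape]
  congr 1
  push_cast
  rw [List.map_map, List.map_map, ← List.sum_map_add]
  rfl
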